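-- pv_equiv track=rewrite | github.com/google-research/google-research | etcmodel/models/openkp/input_validate_and_dedup.py | is_keyphrase_whole_words
-- ===== SOURCE A (Python) =====
-- def is_word_start(text, i):
--   if i == 0:
--     return True
--   elif i > 0 and text[i - 1] == ' ':
--     return True
--   else:
--     return False
--
-- def is_word_stop(text, i):
--   if i == len(text):
--     return True
--   elif i > 0 and text[i] == ' ':
--     return True
--   else:
--     return False
--
-- def is_keyphrase_whole_words(text, keyphrase_list):
--   """Check if keyphrase is contained in text ans formed by whole words."""
--   keyphrase = ' '.join(
--       [item.strip() for item in keyphrase_list if item.strip()])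
--   keyphrase_lower = keyphrase.lower()
--   n = len(keyphrase)
--   # The keyphrase has to be a full word match.
--   j = text.find(keyphrase_lower)
--   while j >= 0:
--     if is_word_start(text, j) and is_word_stop(text, j + n):
--       return True, [keyphrase]
--     j = text.find(keyphrase_lower, j + 1)
--   return False, [keyphrase]
-- ===== SOURCE B (Python) =====
-- def is_keyphrase_whole_words(text, keyphrase_list):
--   keyphrase = ' '.join(item.strip() for item in keyphrase_list if item.strip())
--   found = (' ' + keyphrase.lower() + ' ') in (' ' + text + ' ')
--   return found, [keyphrase]
-- ===== Notes on version B (the rewrite author's own statement) =====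
-- stated objective: simpler
-- what changed: A scans every occurrence of the keyphrase with repeated str.find and checks word boundaries via helper functions; B performs a single substring membership test after padding both keyphrase and text with one space on each side, which makes the boundary checks implicit.
-- intended difference: When every list item strips to empty (empty keyphrase) and the text starts with a space but has no double space and no trailing space, A returns (False, ['']) because is_word_stop's i>0 guard rejects position 0, while B returns (True, ['']), consistent with how both treat a leading space for every nonempty keyphrase. — e.g. on is_keyphrase_whole_words(" a", []): A returns (false, [""]), B returns (true, [""])
import Mathlib
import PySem

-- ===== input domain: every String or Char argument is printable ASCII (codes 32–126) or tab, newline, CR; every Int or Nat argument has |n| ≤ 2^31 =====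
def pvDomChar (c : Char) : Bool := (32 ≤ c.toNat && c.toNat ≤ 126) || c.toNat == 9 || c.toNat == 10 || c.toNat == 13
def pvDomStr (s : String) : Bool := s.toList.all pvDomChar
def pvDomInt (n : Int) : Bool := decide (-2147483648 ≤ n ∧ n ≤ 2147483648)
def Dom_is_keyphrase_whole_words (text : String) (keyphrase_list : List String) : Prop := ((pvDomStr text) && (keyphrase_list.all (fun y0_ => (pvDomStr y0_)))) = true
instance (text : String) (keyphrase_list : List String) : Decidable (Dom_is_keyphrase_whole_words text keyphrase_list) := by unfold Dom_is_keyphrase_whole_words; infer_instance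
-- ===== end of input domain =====

-- B replaces A's find-and-check-boundaries loop by one padded substring test (' '+kp+' ' in ' '+text+' ');
-- on the degenerate empty-keyphrase corner (see D_) B's value is the consistent one.


-- ===== PORT A =====
-- keyphrase = ' '.join([item.strip() for item in keyphrase_list if item.strip()])
-- (the identical first line of A and B, shared as one helper)
def pvStripJoin (keyphrase_list : List String) : List Char :=
  PySem.Chars.join [' ']
    ((keyphrase_list.map (fun item => PySem.Chars.strip item.toList)).filter (fun cs => cs ≠ []))

-- is_word_start(text, i); text[i-1] is only ever read in range at the call sites (0 < i ≤ len(text)),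
-- so the `pyGet? = some ' '` comparison is exact.
def pvIsWordStart (ts : List Char) (i : Int) : Bool :=
  if i = 0 then true
  else if i > 0 && (PySem.List.pyGet? ts (i - 1) == some ' ') then true
  else false

-- is_word_stop(text, i); text[i] likewise only read in range (0 < i < len(text)).
def pvIsWordStop (ts : List Char) (i : Int) : Bool :=
  if i = PySem.List.len ts then true
  else if i > 0 && (PySem.List.pyGet? ts i == some ' ') then true
  else false

-- the `while j >= 0:` loop of A, entered only with j >= 0; exits when the next find returns -1.
-- fuel is only a totality guard: the loop visits strictly increasing indices <= len(text), so
-- len(text)+1 steps always suffice (pvLoop_iff below proves the characterisation under exactly that bound).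
def pvFindLoop (ts kpl : List Char) (n : Int) : Nat → Nat → Bool
  | 0, _ => false
  | fuel+1, j =>
    if pvIsWordStart ts (j : Int) && pvIsWordStop ts ((j : Int) + n) then true
    else
      let j' := PySem.Chars.findFrom ts kpl ((j : Int) + 1) none
      if j' < 0 then false
      else pvFindLoop ts kpl n fuel j'.toNat

def is_keyphrase_whole_words (text : String) (keyphrase_list : List String) : Bool × List String :=
  let keyphrase := pvStripJoin keyphrase_list
  let keyphrase_lower := PySem.Chars.lower keyphrase
  let n : Int := PySem.List.len keyphrase
  let ts := text.toList
  let j := PySem.Chars.find ts keyphrase_lower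
  if j < 0 then (false, [String.ofList keyphrase])
  else (pvFindLoop ts keyphrase_lower n (ts.length + 1) j.toNat, [String.ofList keyphrase])

-- ===== PORT B =====
def is_keyphrase_whole_words_alt (text : String) (keyphrase_list : List String) : Bool × List String :=
  let keyphrase := pvStripJoin keyphrase_list
  let found := PySem.Chars.isIn (' ' :: (PySem.Chars.lower keyphrase ++ [' ']))
                                (' ' :: (text.toList ++ [' ']))
  (found, [String.ofList keyphrase])

-- ===== PRECONDITION & SPEC =====
-- When every list item strips to empty (empty keyphrase) and text starts with a space but has no
-- double space and no trailing space, A returns (False, ['']) by the asymmetric i>0 guard of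
-- is_word_stop, although position 0 is a word start and the empty keyphrase ends at a space there;
-- B returns (True, ['']), consistent with how both programs treat a leading space for every other keyphrase.
def D_is_keyphrase_whole_words (text : String) (keyphrase_list : List String) : Prop :=
  (∀ item ∈ keyphrase_list, PySem.Chars.strip item.toList = []) ∧
  text.toList ≠ [] ∧ text.toList.head? = some ' ' ∧
  ¬ ([' ', ' '] <:+: (text.toList ++ [' ']))
instance (text : String) (keyphrase_list : List String) : Decidable (D_is_keyphrase_whole_words text keyphrase_list) := by
  unfold D_is_keyphrase_whole_words; infer_instance

def Spec_is_keyphrase_whole_words (text : String) (keyphrase_list : List String) (out : Bool × List String) : Prop := ¬ D_is_keyphrase_whole_words text keyphrase_list → out = is_keyphrase_whole_words_alt text keyphrase_list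
instance (text : String) (keyphrase_list : List String) (out : Bool × List String) : Decidable (Spec_is_keyphrase_whole_words text keyphrase_list out) := by unfold Spec_is_keyphrase_whole_words; infer_instance

def pvDiffWitness_is_keyphrase_whole_words : String × List String := (" a", [])
def pvDiffWitnessOut_is_keyphrase_whole_words : (Bool × List String) × (Bool × List String) :=
  ((false, [""]), (true, [""]))

-- ===== CLAIM (what is proved, stated in full; the proofs are below) =====
def Claim_unchanged_is_keyphrase_whole_words : Prop := ∀ (text : String) (keyphrase_list : List String), Dom_is_keyphrase_whole_words text keyphrase_list → Spec_is_keyphrase_whole_words text keyphrase_list (is_keyphrase_whole_words text keyphrase_list)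
def Claim_changed_is_keyphrase_whole_words : Prop := Dom_is_keyphrase_whole_words (pvDiffWitness_is_keyphrase_whole_words.1) (pvDiffWitness_is_keyphrase_whole_words.2) ∧ D_is_keyphrase_whole_words (pvDiffWitness_is_keyphrase_whole_words.1) (pvDiffWitness_is_keyphrase_whole_words.2) ∧ is_keyphrase_whole_words (pvDiffWitness_is_keyphrase_whole_words.1) (pvDiffWitness_is_keyphrase_whole_words.2) = pvDiffWitnessOut_is_keyphrase_whole_words.1 ∧ is_keyphrase_whole_words_alt (pvDiffWitness_is_keyphrase_whole_words.1) (pvDiffWitness_is_keyphrase_whole_words.2) = pvDiffWitnessOut_is_keyphrase_whole_words.2 ∧ pvDiffWitnessOut_is_keyphrase_whole_words.1 ≠ pvDiffWitnessOut_is_keyphrase_whole_words.2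
def Claim_exact_is_keyphrase_whole_words : Prop := ∀ (text : String) (keyphrase_list : List String), Dom_is_keyphrase_whole_words text keyphrase_list → D_is_keyphrase_whole_words text keyphrase_list → is_keyphrase_whole_words text keyphrase_list ≠ is_keyphrase_whole_words_alt text keyphrase_list

-- ===== LEMMAS AND PROOFS =====

lemma pvFindFrom_gt_len (s sub : List Char) (st : Int) (h0 : 0 ≤ st) (h : (s.length : Int) < st) :
    PySem.Chars.findFrom s sub st none = -1 := by
  simp only [PySem.Chars.findFrom]
  split_ifs with h1 h2 <;> omega


-- the word-boundary test of A's loop, as one Bool (proof-side shorthand)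
def pvBnd (ts : List Char) (n : Int) (i : Nat) : Bool :=
  pvIsWordStart ts (i : Int) && pvIsWordStop ts ((i : Int) + n)

lemma pvStart_iff (ts : List Char) (i : Nat) :
    pvIsWordStart ts (i : Int) = true ↔ (i = 0 ∨ (1 ≤ i ∧ ts[i-1]? = some ' ')) := by
  unfold pvIsWordStart
  rcases Nat.eq_zero_or_pos i with h | h
  · subst h; simp
  · obtain ⟨k, rfl⟩ : ∃ k, i = k + 1 := ⟨i - 1, by omega⟩
    rw [if_neg (by omega)]
    have h1 : (((k+1:Nat)):Int) - 1 = ((k:Nat):Int) := by push_cast; ring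
    rw [h1, PySem.List.pyGet?_natCast]
    simp

lemma pvStop_iff (ts : List Char) (i : Nat) :
    pvIsWordStop ts (i : Int) = true ↔ (i = ts.length ∨ (1 ≤ i ∧ ts[i]? = some ' ')) := by
  unfold pvIsWordStop
  by_cases h : i = ts.length
  · simp [h, PySem.List.len_eq]
  · rw [if_neg (by simp [PySem.List.len_eq]; omega), PySem.List.pyGet?_natCast]
    rcases Nat.eq_zero_or_pos i with h0 | h0
    · subst h0
      simp only [Nat.cast_zero, lt_self_iff_false, decide_false, Bool.false_and, Bool.false_eq_true,
        if_false, false_iff, not_or]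
      exact ⟨h, by simp⟩
    · simp [h]
      omega

lemma pvSuf_prefix (c : Char) (u v : List Char) :
    u ++ [c] <+: v ++ [c] ↔ (u <+: v ∧ (u.length = v.length ∨ v[u.length]? = some c)) := by
  induction u generalizing v with
  | nil =>
    cases v with
    | nil => simp
    | cons b v' =>
      simp only [List.nil_append, List.cons_append, List.cons_prefix_cons, List.nil_prefix,
        List.length_nil, List.length_cons, List.getElem?_cons_zero, true_and]
      constructor
      · rintro ⟨rfl, -⟩; right; rfl
      · rintro (h | h)
        · omega
        · exact ⟨(Option.some_inj.mp h).symm, trivial⟩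
  | cons a u' ih =>
    cases v with
    | nil =>
      simp only [List.cons_append, List.nil_append, List.cons_prefix_cons]
      constructor
      · rintro ⟨rfl, h⟩
        have := h.length_le; simp at this
      · rintro ⟨h, -⟩
        have := h.length_le; simp at this
    | cons b v' =>
      simp only [List.cons_append, List.cons_prefix_cons, ih, List.length_cons,
        List.getElem?_cons_succ]
      constructor
      · rintro ⟨rfl, h1, h2⟩
        exact ⟨⟨rfl, h1⟩, h2.imp_left (fun h => by omega)⟩
      · rintro ⟨⟨rfl, h1⟩, h2⟩
        exact ⟨rfl, h1, h2.imp_left (fun h => by omega)⟩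

lemma pvCast_add (i m : Nat) : (i : Int) + (m : Int) = ((i + m : Nat) : Int) := by push_cast; ring

lemma pvKey (ts kpl : List Char) (i : Nat) (hpos : 1 ≤ i ∨ 1 ≤ kpl.length) :
    (' ' :: (kpl ++ [' '])) <+: (' ' :: (ts ++ [' '])).drop i ↔
      (i ≤ ts.length ∧ kpl <+: ts.drop i ∧ pvBnd ts (kpl.length : Int) i = true) := by
  unfold pvBnd
  rw [pvCast_add, Bool.and_eq_true, pvStart_iff, pvStop_iff]
  cases i with
  | zero =>
    have hk : 1 ≤ kpl.length := hpos.resolve_left (by omega)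
    simp only [List.drop_zero, List.cons_prefix_cons, pvSuf_prefix, Nat.zero_add,
      Nat.le_zero, true_and, Nat.zero_le]
    constructor
    · rintro ⟨h1, h2⟩
      exact ⟨h1, Or.inl trivial, h2.imp_right (fun h => ⟨hk, h⟩)⟩
    · rintro ⟨h1, -, h2⟩
      exact ⟨h1, h2.imp_right And.right⟩
  | succ j =>
    rw [List.drop_succ_cons]
    by_cases hj : j < ts.length
    · rw [List.drop_append_of_le_length (le_of_lt hj), List.drop_eq_getElem_cons hj]
      rw [List.cons_append, List.cons_prefix_cons, pvSuf_prefix]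
      simp only [List.length_drop, List.getElem?_drop]
      constructor
      · rintro ⟨hsp, h1, h2⟩
        refine ⟨by omega, h1,
          Or.inr ⟨by omega, by simp only [Nat.add_sub_cancel]; rw [List.getElem?_eq_getElem hj, ← hsp]⟩, ?_⟩
        rcases h2 with h | h
        · exact Or.inl (by omega)
        · exact Or.inr ⟨by omega, h⟩
      · rintro ⟨hle, h1, hst, hsp⟩
        rcases hst with h | ⟨-, h⟩
        · omega
        simp only [Nat.add_sub_cancel, List.getElem?_eq_getElem hj] at h
        refine ⟨(Option.some_inj.mp h).symm, h1, ?_⟩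
        rcases hsp with h' | ⟨-, h'⟩
        · exact Or.inl (by omega)
        · exact Or.inr h'
    · constructor
      · intro h
        have := h.length_le
        simp only [List.length_cons, List.length_append, List.length_drop] at this
        omega
      · rintro ⟨hle, -, -⟩; omega



lemma pvLoop_iff (ts kpl : List Char) (n : Int) :
    ∀ (fuel j : Nat), ts.length + 1 ≤ fuel + j → j ≤ ts.length → kpl <+: ts.drop j →
      (pvFindLoop ts kpl n fuel j = true ↔
        ∃ i, j ≤ i ∧ i ≤ ts.length ∧ kpl <+: ts.drop i ∧ pvBnd ts n i = true) := by
  intro fuel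
  induction fuel with
  | zero => intro j hfuel hj _; omega
  | succ fuel ih =>
    intro j hfuel hj hocc
    show (if pvIsWordStart ts (j : Int) && pvIsWordStop ts ((j : Int) + n) then true
      else if PySem.Chars.findFrom ts kpl ((j : Int) + 1) none < 0 then false
      else pvFindLoop ts kpl n fuel (PySem.Chars.findFrom ts kpl ((j : Int) + 1) none).toNat) = true ↔ _
    by_cases hb : pvBnd ts n j = true
    · rw [if_pos (by exact hb)]
      exact ⟨fun _ => ⟨j, le_refl j, hj, hocc, hb⟩, fun _ => rfl⟩
    · rw [if_neg (by exact fun h => hb h)]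
      by_cases hj1 : j + 1 ≤ ts.length
      · have heq := PySem.Chars.findFrom_natCast ts kpl (j+1) hj1
        push_cast at heq
        rw [heq]
        by_cases hfind : PySem.Chars.find (ts.drop (j+1)) kpl = -1
        · rw [if_pos (by rw [hfind]; norm_num)]
          simp only [Bool.false_eq_true, false_iff, not_exists]
          rintro i ⟨hji, hile, hocci, hbndi⟩
          rcases Nat.eq_or_lt_of_le hji with rfl | hlt
          · exact hb hbndi
          · have hocc' : kpl <+: (ts.drop (j+1)).drop (i - (j+1)) := by
              rw [List.drop_drop, show j + 1 + (i - (j+1)) = i by omega]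
              exact hocci
            have : PySem.Chars.find (ts.drop (j+1)) kpl ≠ -1 := by
              rw [PySem.Chars.find_ne_neg_one_iff, ← PySem.Chars.isIn_iff_infix,
                ← PySem.Chars.exists_prefix_drop_iff_isIn]
              exact ⟨i - (j+1), hocc'⟩
            exact this hfind
        · have hr0 : 0 ≤ PySem.Chars.find (ts.drop (j+1)) kpl := by
            have := PySem.Chars.neg_one_le_find (ts.drop (j+1)) kpl
            omega
          have hrlen : PySem.Chars.find (ts.drop (j+1)) kpl ≤ ((ts.drop (j+1)).length : Int) :=
            PySem.Chars.find_le_length (ts.drop (j+1)) kpl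
          simp only [List.length_drop] at hrlen
          set r := PySem.Chars.find (ts.drop (j+1)) kpl with hrdef
          have hspec := PySem.Chars.find_spec (s := ts.drop (j+1)) (sub := kpl) hr0
          rw [if_neg hfind]
          rw [if_neg (show ¬((j:Int) + 1 + r < 0) by omega)]
          have htn : ((j:Int) + 1 + r).toNat = j + 1 + r.toNat := by omega
          rw [htn]
          have hocc' : kpl <+: ts.drop (j + 1 + r.toNat) := by
            have h1 := hspec.1
            rw [List.drop_drop] at h1
            exact h1
          have hle' : j + 1 + r.toNat ≤ ts.length := by omega
          rw [ih (j + 1 + r.toNat) (by omega) hle' hocc']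
          constructor
          · rintro ⟨i, hji, hile, hocci, hbndi⟩
            exact ⟨i, by omega, hile, hocci, hbndi⟩
          · rintro ⟨i, hji, hile, hocci, hbndi⟩
            refine ⟨i, ?_, hile, hocci, hbndi⟩
            rcases Nat.eq_or_lt_of_le hji with rfl | hlt
            · exact absurd hbndi hb
            · by_contra hcon
              rw [not_le] at hcon
              have hm : i - (j+1) < r.toNat := by omega
              have : kpl <+: (ts.drop (j+1)).drop (i - (j+1)) := by
                rw [List.drop_drop, show j + 1 + (i - (j+1)) = i by omega]
                exact hocci
              exact hspec.2 (i - (j+1)) hm this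
      · have hjlen : j = ts.length := by omega
        rw [if_pos (by rw [pvFindFrom_gt_len ts kpl _ (by omega) (by omega)]; norm_num)]
        simp only [Bool.false_eq_true, false_iff, not_exists]
        rintro i ⟨hji, hile, hocci, hbndi⟩
        have : i = j := by omega
        subst this
        exact hb hbndi

lemma pvKey0 (ts : List Char) :
    ([' ', ' '] : List Char) <+: (' ' :: (ts ++ [' '])) ↔ (ts = [] ∨ ts[0]? = some ' ') := by
  cases ts with
  | nil => simp
  | cons a t => simp [List.cons_prefix_cons, eq_comm]

lemma pvInfix_iff_drop (sub l : List Char) : sub <:+: l ↔ ∃ j, sub <+: l.drop j := by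
  rw [← PySem.Chars.isIn_iff_infix, ← PySem.Chars.exists_prefix_drop_iff_isIn]

lemma pvA_iff (ts kpl : List Char) (n : Int) :
    (if PySem.Chars.find ts kpl < 0 then false
     else pvFindLoop ts kpl n (ts.length + 1) (PySem.Chars.find ts kpl).toNat) = true ↔
      ∃ i, i ≤ ts.length ∧ kpl <+: ts.drop i ∧ pvBnd ts n i = true := by
  by_cases hf : PySem.Chars.find ts kpl < 0
  · rw [if_pos hf]
    have hm1 : PySem.Chars.find ts kpl = -1 := by
      have := PySem.Chars.neg_one_le_find ts kpl; omega
    have hninf : ¬ kpl <:+: ts := (PySem.Chars.find_eq_neg_one_iff ts kpl).mp hm1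
    simp only [Bool.false_eq_true, false_iff, not_exists]
    rintro i ⟨hile, hocc, hbnd⟩
    exact hninf (hocc.isInfix.trans (List.drop_suffix i ts).isInfix)
  · rw [if_neg hf]
    have h0 : 0 ≤ PySem.Chars.find ts kpl := by omega
    have hspec := PySem.Chars.find_spec (s := ts) (sub := kpl) h0
    have hlen := PySem.Chars.find_le_length ts kpl
    have htle : (PySem.Chars.find ts kpl).toNat ≤ ts.length := by omega
    rw [pvLoop_iff ts kpl n (ts.length + 1) (PySem.Chars.find ts kpl).toNat (by omega) htle hspec.1]
    constructor
    · rintro ⟨i, -, hile, hocc, hbnd⟩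
      exact ⟨i, hile, hocc, hbnd⟩
    · rintro ⟨i, hile, hocc, hbnd⟩
      refine ⟨i, ?_, hile, hocc, hbnd⟩
      by_contra hcon
      exact hspec.2 i (by omega) hocc

lemma pvStripJoin_nil_iff (kl : List String) :
    pvStripJoin kl = [] ↔ ∀ item ∈ kl, PySem.Chars.strip item.toList = [] := by
  unfold pvStripJoin
  have hfilter : ((kl.map (fun item => PySem.Chars.strip item.toList)).filter (fun cs => cs ≠ [])) = []
      ↔ ∀ item ∈ kl, PySem.Chars.strip item.toList = [] := by
    rw [List.filter_eq_nil_iff]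
    simp
  rcases h : ((kl.map (fun item => PySem.Chars.strip item.toList)).filter (fun cs => cs ≠ [])) with _ | ⟨x, L⟩
  · rw [h]
    exact ⟨fun _ => hfilter.mp h, fun _ => rfl⟩
  · rw [h]
    have hx : x ≠ [] := by
      have hmem : x ∈ ((kl.map (fun item => PySem.Chars.strip item.toList)).filter (fun cs => cs ≠ [])) := by
        rw [h]; exact List.mem_cons_self
      simpa using (List.of_mem_filter hmem)
    have hne : PySem.Chars.join [' '] (x :: L) ≠ [] := by
      cases L with
      | nil => simpa [PySem.Chars.join, List.intercalate] using hx
      | cons y L' =>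
        rw [PySem.Chars.join_cons_cons]
        simp [hx]
    exact ⟨fun hj => absurd hj hne, fun hall => absurd (h.symm.trans (hfilter.mpr hall)) (by simp)⟩

-- A's boolean, via pvA_iff, for the empty keyphrase: no boundary pair exists when the text is
-- nonempty and has no double/trailing space
lemma pvEmpty_noBnd (ts : List Char) (hne : ts ≠ [])
    (hninf : ¬ ([' ', ' '] <:+: (ts ++ [' ']))) :
    ¬ ∃ i, i ≤ ts.length ∧ ([] : List Char) <+: ts.drop i ∧ pvBnd ts ((0:Nat) : Int) i = true := by
  rintro ⟨i, hile, -, hbnd⟩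
  cases i with
  | zero =>
    have hstop := (Bool.and_eq_true _ _).mp hbnd |>.2
    rw [show ((0:Nat) : Int) + ((0:Nat) : Int) = (((0:Nat) + (0:Nat) : Nat) : Int) by simp] at hstop
    rw [pvStop_iff] at hstop
    rcases hstop with h | ⟨h, -⟩
    · exact hne (List.eq_nil_of_length_eq_zero h.symm)
    · omega
  | succ m =>
    have hP : (' ' :: (([] : List Char) ++ [' '])) <+: (' ' :: (ts ++ [' '])).drop (m+1) := by
      apply (pvKey ts [] (m+1) (Or.inl (by omega))).mpr
      exact ⟨hile, List.nil_prefix, by simpa using hbnd⟩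
    apply hninf
    rw [pvInfix_iff_drop]
    refine ⟨m, ?_⟩
    rw [List.drop_succ_cons] at hP
    simpa using hP

-- ===== VERDICT (by name: the statement is the Claim_ definition above) =====
theorem is_keyphrase_whole_words_spec : Claim_unchanged_is_keyphrase_whole_words := by
  intro text kl _
  unfold Spec_is_keyphrase_whole_words
  intro hD
  unfold is_keyphrase_whole_words is_keyphrase_whole_words_alt
  rw [Prod.ext_iff]
  refine ⟨?_, by rw [apply_ite Prod.snd]; simp⟩
  rw [apply_ite Prod.fst]
  simp only
  set ts := text.toList with hts
  set kp := pvStripJoin kl with hkp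
  set kpl := PySem.Chars.lower kp with hkpl
  have hn : (PySem.List.len kp : Int) = ((kpl.length : Nat) : Int) := by
    rw [PySem.List.len_eq, hkpl, PySem.Chars.lower, List.length_map]
  rw [hn, Bool.eq_iff_iff, pvA_iff ts kpl ((kpl.length : Nat) : Int),
    ← PySem.Chars.exists_prefix_drop_iff_isIn]
  by_cases hk : kpl = []
  · -- empty keyphrase: the corner, outside D_
    have hkp0 : kp = [] := by
      have hlow := hkpl.symm.trans hk
      rcases kp with _ | ⟨c, t⟩
      · rfl
      · simp [PySem.Chars.lower] at hlow
    have hall : ∀ item ∈ kl, PySem.Chars.strip item.toList = [] :=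
      (pvStripJoin_nil_iff kl).mp (by rw [← hkp]; exact hkp0)
    rw [hk]
    simp only [List.length_nil, List.nil_append]
    by_cases hts0 : ts = []
    · rw [hts0]
      constructor
      · intro _; exact ⟨0, by decide⟩
      · intro _
        exact ⟨0, by simp, List.nil_prefix, by decide⟩
    · by_cases hsp : ([' ', ' '] : List Char) <:+: (ts ++ [' '])
      · rw [pvInfix_iff_drop] at hsp
        obtain ⟨m, hm⟩ := hsp
        constructor
        · intro _
          exact ⟨m + 1, by rw [List.drop_succ_cons]; simpa using hm⟩
        · intro _
          have hP : (' ' :: (([] : List Char) ++ [' '])) <+: (' ' :: (ts ++ [' '])).drop (m+1) := by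
            rw [List.drop_succ_cons]; simpa using hm
          have h := (pvKey ts [] (m+1) (Or.inl (by omega))).mp hP
          exact ⟨m + 1, h.1, h.2.1, by simpa using h.2.2⟩
      · -- both false; uses ¬D_
        have hhead : ¬ (ts[0]? = some ' ') := by
          intro hh
          apply hD
          refine ⟨hall, hts0, ?_, hsp⟩
          rw [List.head?_eq_getElem?]; exact hh
        constructor
        · intro hex
          exact absurd (by simpa using hex) (pvEmpty_noBnd ts hts0 hsp)
        · rintro ⟨j, hP⟩
          cases j with
          | zero =>
            simp only [List.drop_zero] at hP
            rcases (pvKey0 ts).mp hP with h | h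
            · exact absurd h hts0
            · exact absurd h hhead
          | succ m =>
            rw [List.drop_succ_cons] at hP
            exact absurd (pvInfix_iff_drop _ _ |>.mpr ⟨m, by simpa using hP⟩) hsp
  · -- nonempty keyphrase: exact agreement
    have hk1 : 1 ≤ kpl.length := by
      rcases kpl with _ | _
      · exact absurd rfl hk
      · simp
    constructor
    · rintro ⟨i, h1, h2, h3⟩
      exact ⟨i, (pvKey ts kpl i (Or.inr hk1)).mpr ⟨h1, h2, h3⟩⟩
    · rintro ⟨j, hP⟩
      have hlen := hP.length_le
      simp only [List.length_cons, List.length_append, List.length_drop] at hlen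
      have hj : j ≤ ts.length := by omega
      exact ⟨j, (pvKey ts kpl j (Or.inr hk1)).mp hP⟩

theorem is_keyphrase_whole_words_changed : Claim_changed_is_keyphrase_whole_words := by
  unfold Claim_changed_is_keyphrase_whole_words; decide

theorem is_keyphrase_whole_words_tight : Claim_exact_is_keyphrase_whole_words := by
  intro text kl _ hD
  obtain ⟨hall, hne, hhead, hninf⟩ := hD
  intro hcontra
  have hfst := congrArg Prod.fst hcontra
  unfold is_keyphrase_whole_words is_keyphrase_whole_words_alt at hfst
  rw [apply_ite Prod.fst] at hfst
  simp only at hfst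
  set ts := text.toList with hts
  have hkp0 : pvStripJoin kl = [] := (pvStripJoin_nil_iff kl).mpr hall
  rw [hkp0] at hfst
  simp only [PySem.Chars.lower, List.map_nil, PySem.List.len_eq, List.length_nil,
    Nat.cast_zero, List.nil_append] at hfst
  -- B's side is true: the padded text starts with two spaces
  have hB : PySem.Chars.isIn [' ', ' '] (' ' :: (ts ++ [' '])) = true := by
    rw [← PySem.Chars.exists_prefix_drop_iff_isIn]
    refine ⟨0, ?_⟩
    rw [List.drop_zero]
    exact (pvKey0 ts).mpr (Or.inr (by rw [← List.head?_eq_getElem?]; exact hhead))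
  rw [hB] at hfst
  -- A's side is false
  have hA := (pvA_iff ts [] 0).mp hfst
  exact pvEmpty_noBnd ts hne hninf (by simpa using hA)
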